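-- pv_equiv track=rewrite | github.com/kmeixner247/AoC2023 | 13/script.py | check_pattern
-- ===== SOURCE A (Python) =====
-- def check_pattern(pattern):
-- 	for idx in range(len(pattern) - 1):
-- 		low = idx
-- 		high = idx + 1
-- 		while pattern[low] == pattern[high]:
-- 			if low == 0 or high == len(pattern) - 1:
-- 				return idx + 1
-- 			low -= 1
-- 			high += 1
-- 	return 0
-- ===== SOURCE B (Python) =====
-- def check_pattern(pattern):
--     # Stage 1: intern each row to a small integer id via a hash map built once,
--     # so all later row comparisons are integer comparisons.
--     # Stage 2: reverse the id sequence once; axis i is a valid reflection iff the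
--     # boundary-anchored window seq[lo:hi] around it (lo = max(0, 2i-n),
--     # hi = min(n, 2i)) is a palindrome, i.e. equals the matching slice of the
--     # reversed sequence. A constant-time pre-test (the two rows adjacent to the
--     # axis must match — the middle pair of the window) skips hopeless axes
--     # without building slices. Return the first valid axis, else 0.
--     n = len(pattern)
--     ids = {}
--     seq = [ids.setdefault(row, len(ids)) for row in pattern]
--     rev = seq[::-1]
--     for i in range(1, n):
--         if seq[i] == seq[i - 1]:
--             lo = max(0, 2 * i - n)
--             hi = min(n, 2 * i)
--             if seq[lo:hi] == rev[n - hi:n - lo]: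
--                 return i
--     return 0
-- ===== Notes on version B (the rewrite author's own statement) =====
-- stated objective: alternative
-- what changed: Replaces A's per-axis two-pointer expansion over string rows by a staged pipeline: rows are interned to integer ids via a hash map built once, the id sequence is reversed once, and each axis (after a constant-time adjacent-pair pre-test) is checked by a single slice equality between the boundary-anchored window and the matching slice of the reversed sequence, instead of mirrored-pair expansion.
import Mathlib
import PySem

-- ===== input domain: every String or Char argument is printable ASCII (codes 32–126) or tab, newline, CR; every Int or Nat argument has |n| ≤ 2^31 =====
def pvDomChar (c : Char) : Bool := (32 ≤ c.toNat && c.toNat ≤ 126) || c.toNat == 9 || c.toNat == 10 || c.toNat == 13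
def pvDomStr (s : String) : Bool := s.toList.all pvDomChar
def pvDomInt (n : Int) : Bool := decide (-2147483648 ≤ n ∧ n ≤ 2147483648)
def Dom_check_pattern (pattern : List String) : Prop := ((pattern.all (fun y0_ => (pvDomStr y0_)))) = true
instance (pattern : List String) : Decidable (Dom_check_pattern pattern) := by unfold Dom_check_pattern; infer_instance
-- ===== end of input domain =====

-- B replaces A's two-pointer expansion over string rows by a staged pipeline:
-- intern rows to int ids with a dict built once, reverse the id list once, then
-- test each axis by one slice equality (objective: alternative).

-- ===== PORT A =====
/-- A's inner `while` loop. Python's `low`/`high` are ints, but the loop keeps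
`0 ≤ low` (it decrements `low` only after checking `low != 0`), so `Nat` for `low`
is exact; returns whether the loop hits `return idx + 1`. -/
def checkWhile (pattern : List String) (low high : Nat) : Bool :=
  if PySem.List.pyGet? pattern (low : Int) = PySem.List.pyGet? pattern (high : Int) then
    if h : low = 0 ∨ high = pattern.length - 1 then true
    else checkWhile pattern (low - 1) (high + 1)
  else false
termination_by low
decreasing_by omega

/-- A's `for idx in range(len(pattern)-1)` with early return; `List.range` over the
Nat bound `len - 1` is exact (Python's `range` of a negative bound is also empty). -/
def checkFor (pattern : List String) : List Nat → Int
  | [] => 0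
  | idx :: rest =>
      if checkWhile pattern idx (idx + 1) then ((idx : Int) + 1) else checkFor pattern rest

def check_pattern (pattern : List String) : Int :=
  checkFor pattern (List.range (pattern.length - 1))

-- ===== PORT B =====
/-- B's interning comprehension `[ids.setdefault(row, len(ids)) for row in pattern]`:
`setdefault` returns the present value or inserts and returns the default `len(ids)`. -/
def internGo : List String → PySem.Dict String Int → List Int
  | [], _ => []
  | row :: rest, ids =>
      (PySem.Dict.get? ids row).getD (PySem.Dict.size ids : Int)
        :: internGo rest (PySem.Dict.setdefault ids row (PySem.Dict.size ids : Int))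

/-- B's axis loop `for i in range(1, n): if seq[i] == seq[i-1]: ... if seq[lo:hi] ==
rev[n-hi:n-lo]: return i`. -/
def axisLoop (seq rev : List Int) (n : Int) : List Int → Int
  | [] => 0
  | i :: rest =>
      if PySem.List.pyGet? seq i = PySem.List.pyGet? seq (i - 1) then
        let lo := max 0 (2 * i - n)
        let hi := min n (2 * i)
        if PySem.List.slice seq (some lo) (some hi)
             = PySem.List.slice rev (some (n - hi)) (some (n - lo))
        then i else axisLoop seq rev n rest
      else axisLoop seq rev n rest

def check_pattern_alt (pattern : List String) : Int :=
  let n : Int := pattern.length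
  let seq := internGo pattern PySem.Dict.empty
  -- `seq[::-1]`
  let rev := (PySem.List.slice? seq none none (-1)).getD []
  axisLoop seq rev n (PySem.List.pyRange 1 n 1)

-- ===== PRECONDITION & SPEC =====
def Spec_check_pattern (pattern : List String) (out : Int) : Prop := out = check_pattern_alt pattern
instance (pattern : List String) (out : Int) : Decidable (Spec_check_pattern pattern out) := by unfold Spec_check_pattern; infer_instance

-- ===== CLAIM (what is proved, stated in full; the proofs are below) =====
def Claim_equal_check_pattern : Prop := ∀ (pattern : List String), Dom_check_pattern pattern → Spec_check_pattern pattern (check_pattern pattern)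

-- ===== LEMMAS AND PROOFS =====

/-- Invariant of the interning dict: distinct keys have distinct values, and all
values lie in `[0, size)` (so `size` itself is always fresh). -/
def DInv (d : PySem.Dict String Int) : Prop :=
  (∀ r₁ r₂ v, PySem.Dict.get? d r₁ = some v → PySem.Dict.get? d r₂ = some v → r₁ = r₂) ∧
  (∀ r v, PySem.Dict.get? d r = some v → 0 ≤ v ∧ v < (PySem.Dict.size d : Int))

lemma intern_spec : ∀ (rows : List String) (d : PySem.Dict String Int), DInv d →
    ∃ d' : PySem.Dict String Int,
      internGo rows d = rows.map (fun r => (PySem.Dict.get? d' r).getD 0)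
      ∧ DInv d'
      ∧ (∀ r v, PySem.Dict.get? d r = some v → PySem.Dict.get? d' r = some v)
      ∧ (∀ r ∈ rows, (PySem.Dict.get? d' r).isSome = true) := by
  intro rows
  induction rows with
  | nil => exact fun d hd => ⟨d, rfl, hd, fun _ _ h => h, by simp⟩
  | cons row rest ih =>
    intro d hd
    by_cases hc : (PySem.Dict.get? d row).isSome
    · obtain ⟨v, hv⟩ := Option.isSome_iff_exists.mp hc
      have hset : PySem.Dict.setdefault d row (PySem.Dict.size d : Int) = d :=
        PySem.Dict.setdefault_of_contains d _ (by rw [PySem.Dict.contains_eq_isSome_get?]; exact hc)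
      obtain ⟨d', h1, h2, h3, h4⟩ := ih d hd
      refine ⟨d', ?_, h2, h3, ?_⟩
      · rw [internGo, hset, h1, hv]
        simp [h3 _ _ hv]
      · intro r hr
        rcases List.mem_cons.mp hr with h | h
        · subst h; simp [h3 _ _ hv]
        · exact h4 r h
    · have hn : PySem.Dict.get? d row = none := Option.not_isSome_iff_eq_none.mp hc
      have hcf : PySem.Dict.contains d row = false :=
        (PySem.Dict.get?_eq_none_iff_contains d row).mp hn
      have hset : PySem.Dict.setdefault d row (PySem.Dict.size d : Int)
          = PySem.Dict.insert d row (PySem.Dict.size d : Int) :=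
        PySem.Dict.setdefault_of_not_contains d _ hcf
      have hsize : (PySem.Dict.insert d row (PySem.Dict.size d : Int)).size = d.size + 1 := by
        rw [PySem.Dict.size_insert, hcf]; simp
      have hd1 : DInv (PySem.Dict.insert d row (PySem.Dict.size d : Int)) := by
        constructor
        · intro r₁ r₂ v h₁ h₂
          rw [PySem.Dict.get?_insert] at h₁ h₂
          split_ifs at h₁ h₂ with e₁ e₂ e₂
          · exact e₁.trans e₂.symm
          · exfalso
            have hb := (hd.2 r₂ v h₂).2
            have hv := Option.some.inj h₁
            omega
          · exfalso
            have hb := (hd.2 r₁ v h₁).2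
            have hv := Option.some.inj h₂
            omega
          · exact hd.1 r₁ r₂ v h₁ h₂
        · intro r v h
          rw [PySem.Dict.get?_insert] at h
          rw [hsize]
          split_ifs at h with e
          · have hv := Option.some.inj h
            omega
          · have := hd.2 r v h
            omega
      obtain ⟨d', h1, h2, h3, h4⟩ := ih _ hd1
      have hpres : ∀ r v, PySem.Dict.get? d r = some v → PySem.Dict.get? d' r = some v := by
        intro r v h
        apply h3
        rw [PySem.Dict.get?_insert]
        split_ifs with e
        · subst e; rw [hn] at h; cases h
        · exact h
      have hrow : PySem.Dict.get? d' row = some (PySem.Dict.size d : Int) := by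
        apply h3; rw [PySem.Dict.get?_insert]; simp
      refine ⟨d', ?_, h2, hpres, ?_⟩
      · rw [internGo, hset, h1, hn]
        simp [hrow]
      · intro r hr
        rcases List.mem_cons.mp hr with h | h
        · subst h; simp [hrow]
        · exact h4 r h

/-- A's expansion loop equals the all-quantified mirrored-pair scan of closed-form
width (bridge used to compare it with B's slice test). -/
lemma checkWhile_eq (pattern : List String) :
    ∀ low high : Nat, low < high → high < pattern.length →
      checkWhile pattern low high
        = (List.range (min (low + 1) (pattern.length - high))).all
            (fun s => decide (PySem.List.pyGet? pattern ((low - s : Nat) : Int)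
                            = PySem.List.pyGet? pattern ((high + s : Nat) : Int))) := by
  intro low
  induction low using Nat.strong_induction_on with
  | _ low ih =>
    intro high hlh hh
    rw [checkWhile]
    by_cases heq : PySem.List.pyGet? pattern (low : Int) = PySem.List.pyGet? pattern (high : Int)
    · rw [if_pos heq]
      by_cases hb : low = 0 ∨ high = pattern.length - 1
      · rw [dif_pos hb]
        have hmin : min (low + 1) (pattern.length - high) = 1 := by
          rcases hb with h0 | hn <;> omega
        have heq' : pattern[low]? = pattern[high]? := by simpa using heq
        rw [hmin, List.range_one]
        simp [heq']
      · rw [dif_neg hb]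
        have h0 : low ≠ 0 := fun h => hb (Or.inl h)
        have hn : high ≠ pattern.length - 1 := fun h => hb (Or.inr h)
        rw [ih (low - 1) (by omega) (high + 1) (by omega) (by omega)]
        have hmin : min (low + 1) (pattern.length - high)
            = min (low - 1 + 1) (pattern.length - (high + 1)) + 1 := by omega
        rw [hmin, List.range_succ_eq_map, List.all_cons, List.all_map]
        have h0' : (decide (PySem.List.pyGet? pattern ((low - 0 : Nat) : Int)
            = PySem.List.pyGet? pattern ((high + 0 : Nat) : Int))) = true := by
          simpa using heq
        rw [h0', Bool.true_and]
        congr 1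
        funext s
        have e1 : low - 1 - s = low - (s + 1) := by omega
        have e2 : high + 1 + s = high + (s + 1) := by omega
        simp [e1, e2, Nat.succ_eq_add_one]
    · rw [if_neg heq]
      have heq' : ¬ pattern[low]? = pattern[high]? := by simpa using heq
      refine (List.all_eq_false.mpr ⟨0, List.mem_range.mpr (by omega), ?_⟩).symm
      simp [heq']

/-- The mirrored-pair form of A's loop condition (helper for `axis_cond_iff`). -/
lemma axis_pairs_iff (pattern : List String)
    (i : Nat) (h1 : 1 ≤ i) (h2 : i < pattern.length) :
    checkWhile pattern (i - 1) i = true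
    ↔ (∀ t, t < min i (pattern.length - i) → pattern[i - 1 - t]? = pattern[i + t]?) := by
  rw [checkWhile_eq pattern (i - 1) i (by omega) (by omega)]
  have hmin : min (i - 1 + 1) (pattern.length - i) = min i (pattern.length - i) := by omega
  rw [hmin]
  have ecast : ∀ t : Nat, PySem.List.pyGet? pattern ((i : Int) + (t : Int)) = pattern[i + t]? := by
    intro t
    rw [← Nat.cast_add, PySem.List.pyGet?_natCast]
  simp [List.all_eq_true, List.mem_range, PySem.List.pyGet?_natCast, ecast]

/-- B's slice equality equals A's loop condition (helper for `axis_cond_iff`). -/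
lemma axis_slice_iff (pattern : List String) (f : String → Int)
    (hinj : ∀ a ∈ pattern, ∀ b ∈ pattern, f a = f b → a = b)
    (i : Nat) (h1 : 1 ≤ i) (h2 : i < pattern.length) :
    (PySem.List.slice (pattern.map f)
        (some (max 0 (2 * (i : Int) - (pattern.length : Int))))
        (some (min (pattern.length : Int) (2 * (i : Int))))
      = PySem.List.slice (pattern.map f).reverse
        (some ((pattern.length : Int) - min (pattern.length : Int) (2 * (i : Int))))
        (some ((pattern.length : Int) - max 0 (2 * (i : Int) - (pattern.length : Int)))))
    ↔ checkWhile pattern (i - 1) i = true := by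
  have hN : 1 ≤ pattern.length := by omega
  set N := pattern.length with hNdef
  set k := min i (N - i) with hkdef
  have hk1 : 1 ≤ k := by omega
  set lo := i - k with hlodef
  set hi := i + k with hhidef
  have hloN : lo ≤ N := by omega
  have hhiN : hi ≤ N := by omega
  have hlo : max 0 (2 * (i : Int) - (N : Int)) = ((lo : Nat) : Int) := by omega
  have hhi : min ((N : Int)) (2 * (i : Int)) = ((hi : Nat) : Int) := by omega
  rw [hlo, hhi]
  have e1 : (N : Int) - ((hi : Nat) : Int) = ((N - hi : Nat) : Int) := by omega
  have e2 : (N : Int) - ((lo : Nat) : Int) = ((N - lo : Nat) : Int) := by omega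
  rw [e1, e2, PySem.List.slice_natCast, PySem.List.slice_natCast]
  set s := pattern.map f with hsdef
  have hslen : s.length = N := by simp [hsdef, hNdef]
  -- the right-hand slice is the reverse of the window
  have hrev1 : s.reverse.drop (N - hi) = (s.take hi).reverse := by
    rw [List.drop_reverse, hslen]
    congr 2
    omega
  have htklen : (s.take hi).length = hi := by simp [hslen]; omega
  have hrev2 : (s.take hi).reverse.take (N - lo - (N - hi)) = ((s.take hi).drop lo).reverse := by
    rw [List.take_reverse, htklen]
    congr 2
    omega
  have hdt : (s.take hi).drop lo = (s.drop lo).take (2 * k) := by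
    have e : hi = lo + 2 * k := by omega
    rw [e]
    exact Eq.symm List.take_drop
  have htk : hi - lo = 2 * k := by omega
  rw [hrev1, hrev2, hdt, htk]
  set w := (s.drop lo).take (2 * k) with hwdef
  have hwlen : w.length = 2 * k := by
    simp [hwdef, hslen]
    omega
  have hwget : ∀ j, j < 2 * k → w[j]? = (pattern[lo + j]?).map f := by
    intro j hj
    rw [hwdef, List.getElem?_take_of_lt hj, List.getElem?_drop, hsdef, List.getElem?_map]
  have keymap : ∀ a b, a < N → b < N →
      (((pattern[a]?).map f = (pattern[b]?).map f) ↔ pattern[a]? = pattern[b]?) := by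
    intro a b ha hb
    rw [List.getElem?_eq_getElem ha, List.getElem?_eq_getElem hb]
    simp only [Option.map_some]
    constructor
    · intro h
      exact congrArg some (hinj _ (List.getElem_mem ha) _ (List.getElem_mem hb)
        (Option.some.inj h))
    · intro h
      rw [Option.some.inj h]
  -- the window is a palindrome iff all mirrored pairs agree
  have hfull : (w = w.reverse) ↔ ∀ j, j < 2 * k → w[j]? = w[2 * k - 1 - j]? := by
    constructor
    · intro h j hj
      conv_lhs => rw [h]
      rw [List.getElem?_reverse (by rw [hwlen]; exact hj), hwlen]
    · intro h
      apply List.ext_getElem?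
      intro j
      by_cases hj : j < 2 * k
      · rw [List.getElem?_reverse (by rw [hwlen]; exact hj), hwlen]
        exact h j hj
      · rw [List.getElem?_eq_none_iff.mpr (by omega),
          List.getElem?_eq_none_iff.mpr (by rw [List.length_reverse]; omega)]
  have hhalf : (∀ j, j < 2 * k → w[j]? = w[2 * k - 1 - j]?)
      ↔ (∀ j, j < k → w[j]? = w[2 * k - 1 - j]?) := by
    constructor
    · exact fun h j hj => h j (by omega)
    · intro h j hj
      by_cases hjk : j < k
      · exact h j hjk
      · have h' := h (2 * k - 1 - j) (by omega)
        have e : 2 * k - 1 - (2 * k - 1 - j) = j := by omega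
        rw [e] at h'
        exact h'.symm
  have hQ : (∀ j, j < k → w[j]? = w[2 * k - 1 - j]?)
      ↔ (∀ t, t < k → pattern[i - 1 - t]? = pattern[i + t]?) := by
    constructor
    · intro h t ht
      have h' := h (k - 1 - t) (by omega)
      rw [hwget _ (by omega), hwget _ (by omega)] at h'
      have e : lo + (k - 1 - t) = i - 1 - t := by omega
      have e' : lo + (2 * k - 1 - (k - 1 - t)) = i + t := by omega
      rw [e, e'] at h'
      exact (keymap _ _ (by omega) (by omega)).mp h'
    · intro hq j hj
      rw [hwget _ (by omega), hwget _ (by omega)]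
      have e : lo + j = i - 1 - (k - 1 - j) := by omega
      have e' : lo + (2 * k - 1 - j) = i + (k - 1 - j) := by omega
      rw [e, e']
      exact (keymap _ _ (by omega) (by omega)).mpr (hq (k - 1 - j) (by omega))
  rw [axis_pairs_iff pattern i h1 h2]
  exact hfull.trans (hhalf.trans hQ)

/-- Per axis `i` (1 ≤ i < n): B's slice equality on the interned ids holds iff A's
expansion loop at `(i-1, i)` returns true. -/
lemma axis_cond_iff (pattern : List String) (f : String → Int)
    (hinj : ∀ a ∈ pattern, ∀ b ∈ pattern, f a = f b → a = b)
    (i : Nat) (h1 : 1 ≤ i) (h2 : i < pattern.length) :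
    (PySem.List.pyGet? (pattern.map f) (i : Int) = PySem.List.pyGet? (pattern.map f) ((i : Int) - 1)
      ∧ PySem.List.slice (pattern.map f)
        (some (max 0 (2 * (i : Int) - (pattern.length : Int))))
        (some (min (pattern.length : Int) (2 * (i : Int))))
      = PySem.List.slice (pattern.map f).reverse
        (some ((pattern.length : Int) - min (pattern.length : Int) (2 * (i : Int))))
        (some ((pattern.length : Int) - max 0 (2 * (i : Int) - (pattern.length : Int)))))
    ↔ checkWhile pattern (i - 1) i = true := by
  have hguard : (PySem.List.pyGet? (pattern.map f) (i : Int)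
      = PySem.List.pyGet? (pattern.map f) ((i : Int) - 1))
      ↔ ((pattern[i]?).map f = (pattern[i - 1]?).map f) := by
    have ec : (i : Int) - 1 = ((i - 1 : Nat) : Int) := by omega
    rw [ec, PySem.List.pyGet?_natCast, PySem.List.pyGet?_natCast,
      List.getElem?_map, List.getElem?_map]
  rw [hguard]
  constructor
  · exact fun h => (axis_slice_iff pattern f hinj i h1 h2).mp h.2
  · intro h
    refine ⟨?_, (axis_slice_iff pattern f hinj i h1 h2).mpr h⟩
    have hq := (axis_pairs_iff pattern i h1 h2).mp h 0 (by omega)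
    simp only [Nat.sub_zero, Nat.add_zero] at hq
    rw [congrArg (Option.map f) hq]

/-- The two top-level loops agree index for index. -/
lemma loops_eq (pattern : List String) (seq rev : List Int)
    (haxis : ∀ idx : Nat, idx + 1 < pattern.length →
      ((PySem.List.pyGet? seq ((idx : Int) + 1) = PySem.List.pyGet? seq ((idx : Int) + 1 - 1)
        ∧ PySem.List.slice seq (some (max 0 (2 * ((idx : Int) + 1) - (pattern.length : Int))))
          (some (min (pattern.length : Int) (2 * ((idx : Int) + 1))))
        = PySem.List.slice rev
          (some ((pattern.length : Int) - min (pattern.length : Int) (2 * ((idx : Int) + 1))))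
          (some ((pattern.length : Int) - max 0 (2 * ((idx : Int) + 1) - (pattern.length : Int)))))
       ↔ checkWhile pattern idx (idx + 1) = true)) :
    ∀ idxs : List Nat, (∀ j ∈ idxs, j + 1 < pattern.length) →
      checkFor pattern idxs
        = axisLoop seq rev (pattern.length : Int) (idxs.map (fun j => ((j : Nat) : Int) + 1)) := by
  intro idxs
  induction idxs with
  | nil => intro _; rfl
  | cons idx rest ih =>
    intro hmem
    have hidx : idx + 1 < pattern.length := hmem idx (by simp)
    rw [List.map_cons]
    simp only [checkFor, axisLoop]
    by_cases hc : checkWhile pattern idx (idx + 1) = true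
    · obtain ⟨hg, hs⟩ := (haxis idx hidx).mpr hc
      rw [if_pos hc, if_pos hg, if_pos hs]
    · rw [if_neg hc]
      have hrec := ih (fun j hj => hmem j (List.mem_cons_of_mem _ hj))
      by_cases hg : PySem.List.pyGet? seq ((idx : Int) + 1)
          = PySem.List.pyGet? seq ((idx : Int) + 1 - 1)
      · rw [if_pos hg, if_neg (fun hs => hc ((haxis idx hidx).mp ⟨hg, hs⟩))]
        exact hrec
      · rw [if_neg hg]
        exact hrec

-- ===== VERDICT (by name: the statement is the Claim_ definition above) =====
theorem check_pattern_spec : Claim_equal_check_pattern := by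
  intro pattern _
  unfold Spec_check_pattern check_pattern check_pattern_alt
  have hD0 : DInv PySem.Dict.empty := by
    constructor
    · intro r₁ r₂ v h _
      rw [PySem.Dict.get?_empty] at h
      exact absurd h (by simp)
    · intro r v h
      rw [PySem.Dict.get?_empty] at h
      exact absurd h (by simp)
  obtain ⟨d', hmap, hinv, _, htot⟩ := intern_spec pattern PySem.Dict.empty hD0
  set f : String → Int := fun r => (PySem.Dict.get? d' r).getD 0 with hf
  have hinj : ∀ a ∈ pattern, ∀ b ∈ pattern, f a = f b → a = b := by
    intro a ha b hb hab
    obtain ⟨va, hva⟩ := Option.isSome_iff_exists.mp (htot a ha)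
    obtain ⟨vb, hvb⟩ := Option.isSome_iff_exists.mp (htot b hb)
    rw [hf] at hab
    simp only [hva, hvb, Option.getD_some] at hab
    exact hinv.1 a b va hva (hab ▸ hvb)
  rw [hmap]
  show checkFor pattern (List.range (pattern.length - 1))
      = axisLoop (pattern.map f)
          ((PySem.List.slice? (pattern.map f) none none (-1)).getD [])
          ((pattern.length : Nat) : Int) (PySem.List.pyRange 1 ((pattern.length : Nat) : Int) 1)
  rw [PySem.List.slice?_none_none_neg_one, Option.getD_some]
  have hpr : PySem.List.pyRange 1 (pattern.length : Int) 1
      = (List.range (pattern.length - 1)).map (fun j => ((j : Nat) : Int) + 1) := by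
    rw [PySem.List.pyRange_one]
    have e : ((pattern.length : Int) - 1).toNat = pattern.length - 1 := by omega
    rw [e]
    congr 1
    funext j
    ring
  rw [hpr]
  apply loops_eq pattern (pattern.map f) ((pattern.map f).reverse)
  · intro idx hidx
    have h := axis_cond_iff pattern f hinj (idx + 1) (by omega) hidx
    have ec : ((idx + 1 : Nat) : Int) = (idx : Int) + 1 := by push_cast; ring
    rw [ec] at h
    exact h
  · intro j hj
    have := List.mem_range.mp hj
    omega
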